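-- pv_equiv track=rewrite | github.com/BrettRey/hpc-book | code/audit_full_bib.py | _strip_bib_comments
-- ===== SOURCE A (Python) =====
-- from typing import DefaultDict, Dict, Iterable, List, Sequence, Tuple
--
-- def _strip_bib_comments(text: str) -> str:
--     cleaned_lines: List[str] = []
--     for line in text.splitlines():
--         cur: List[str] = []
--         prev = ""
--         for ch in line:
--             if ch == "%" and prev != "\\":
--                 break
--             cur.append(ch)
--             prev = ch
--         cleaned_lines.append("".join(cur))
--     return "\n".join(cleaned_lines)
-- ===== SOURCE B (Python) =====
-- def _strip_bib_comments(text: str) -> str: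
--     cleaned_lines = []
--     for line in text.splitlines():
--         parts = line.split("%")
--         res = parts[0]
--         for part in parts[1:]:
--             if not res.endswith("\\"):
--                 break
--             res += "%" + part
--         cleaned_lines.append(res)
--     return "\n".join(cleaned_lines)
-- ===== Notes on version B (the rewrite author's own statement) =====
-- stated objective: idiomatic
-- what changed: Replaces A's char-by-char accumulator loop with prev-char tracking by splitting each line on the percent sign and re-joining a piece only while the result so far ends with a backslash.
import Mathlib
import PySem

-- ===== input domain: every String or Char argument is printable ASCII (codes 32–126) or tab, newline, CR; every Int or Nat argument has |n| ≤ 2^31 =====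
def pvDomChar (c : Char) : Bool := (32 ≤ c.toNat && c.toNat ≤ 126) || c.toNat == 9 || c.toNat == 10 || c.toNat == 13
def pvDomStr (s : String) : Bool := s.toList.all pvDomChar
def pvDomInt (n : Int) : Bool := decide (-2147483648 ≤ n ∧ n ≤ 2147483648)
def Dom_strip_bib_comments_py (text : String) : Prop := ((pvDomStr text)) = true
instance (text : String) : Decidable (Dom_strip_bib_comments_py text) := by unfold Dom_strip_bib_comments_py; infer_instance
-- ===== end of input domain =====

-- B replaces A's char-by-char scan with a split-on-'%' / reassemble-while-escaped decomposition (objective: idiomatic; same behaviour).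

-- ===== PORT A =====
-- inner loop of A: walk the line char by char, stop at a '%' whose previous char is not a backslash
def pvA_line : List Char → List Char → String → List Char
  | [], cur, _ => cur
  | ch :: rest, cur, prev =>
    if ch = '%' ∧ prev ≠ "\\" then cur
    else pvA_line rest (cur ++ [ch]) (String.ofList [ch])

def strip_bib_comments_py (text : String) : String :=
  PySem.Str.join "\n"
    ((PySem.Str.splitlines text).map (fun line => String.ofList (pvA_line line.toList [] "")))

-- ===== PORT B =====
-- inner loop of B: re-append '%'+part while the result so far ends with a backslash
def pvB_loop : List Char → List (List Char) → List Char
  | res, [] => res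
  | res, p :: ps =>
    if PySem.Chars.endswith res ['\\'] then pvB_loop (res ++ '%' :: p) ps else res

def pvB_line (line : List Char) : List Char :=
  match PySem.Chars.splitOn line ['%'] with
  | [] => []          -- unreachable: split never returns an empty list
  | p :: ps => pvB_loop p ps

def strip_bib_comments_py_alt (text : String) : String :=
  PySem.Str.join "\n"
    ((PySem.Str.splitlines text).map (fun line => String.ofList (pvB_line line.toList)))

-- ===== PRECONDITION & SPEC =====
def Spec_strip_bib_comments_py (text : String) (out : String) : Prop := out = strip_bib_comments_py_alt text
instance (text : String) (out : String) : Decidable (Spec_strip_bib_comments_py text out) := by unfold Spec_strip_bib_comments_py; infer_instance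

-- ===== CLAIM (what is proved, stated in full; the proofs are below) =====
def Claim_equal_strip_bib_comments_py : Prop := ∀ (text : String), Dom_strip_bib_comments_py text → Spec_strip_bib_comments_py text (strip_bib_comments_py text)

-- ===== LEMMAS AND PROOFS =====

-- the common spec: keep chars up to the first '%' not preceded by a backslash
def pvStrip : List Char → Bool → List Char
  | [], _ => []
  | c :: r, esc => if c = '%' ∧ esc = false then [] else c :: pvStrip r (decide (c = '\\'))

theorem pvA_line_eq (cs : List Char) : ∀ (cur : List Char) (prev : String),
    pvA_line cs cur prev = cur ++ pvStrip cs (decide (prev = "\\")) := by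
  induction cs with
  | nil => intro cur prev; simp [pvA_line, pvStrip]
  | cons ch rest ih =>
    intro cur prev
    by_cases h : ch = '%' ∧ prev ≠ "\\"
    · have hd : decide (prev = "\\") = false := by
        simp [h.2]
      simp [pvA_line, pvStrip, h]
    · rw [pvA_line, if_neg h, ih]
      have hc : ¬ (ch = '%' ∧ decide (prev = "\\") = false) := by
        intro hcc; exact h ⟨hcc.1, by simpa using hcc.2⟩
      have hd : decide (String.ofList [ch] = "\\") = decide (ch = '\\') := by
        by_cases hch : ch = '\\'
        · subst hch; simp
        · have : String.ofList [ch] ≠ "\\" := by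
            intro he
            exact hch (by have := congrArg String.toList he; simpa using this)
          simp [this, hch]
      rw [pvStrip, if_neg hc, hd]
      simp

-- structural version of split-on-'%'
def pvSpl : List Char → List (List Char)
  | [] => [[]]
  | c :: r =>
    if c = '%' then [] :: pvSpl r
    else match pvSpl r with
      | [] => [[c]]
      | p :: ps => (c :: p) :: ps

theorem pvSpl_ne_nil (l : List Char) : pvSpl l ≠ [] := by
  cases l with
  | nil => simp [pvSpl]
  | cons c r =>
    rw [pvSpl]
    split
    · simp
    · split <;> simp

def pvConsHead (pre : List Char) : List (List Char) → List (List Char)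
  | [] => [pre]
  | p :: ps => (pre ++ p) :: ps

theorem pvConsHead_nil (xs : List (List Char)) (h : xs ≠ []) : pvConsHead [] xs = xs := by
  cases xs with
  | nil => exact absurd rfl h
  | cons p ps => simp [pvConsHead]

theorem pv_go_eq (fuel : Nat) : ∀ (l cur : List Char) (acc : List (List Char)),
    l.length < fuel →
    PySem.Chars.splitOn.go ['%'] fuel l cur acc = acc.reverse ++ pvConsHead cur.reverse (pvSpl l) := by
  induction fuel with
  | zero => intro l cur acc h; omega
  | succ fuel ih =>
    intro l cur acc h
    cases l with
    | nil => simp [PySem.Chars.splitOn.go, pvSpl, pvConsHead]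
    | cons c rest =>
      rw [PySem.Chars.splitOn.go]
      by_cases hc : c = '%'
      · have hp : List.isPrefixOf ['%'] (c :: rest) = true := by
          simp [List.isPrefixOf, hc]
        rw [if_pos hp]
        simp only [List.length_cons] at h
        have hdrop : List.drop ['%'].length (c :: rest) = rest := by simp
        rw [hdrop, ih _ _ _ (by omega), List.reverse_nil, pvConsHead_nil _ (pvSpl_ne_nil rest)]
        simp [pvSpl, hc, pvConsHead]
      · have hp : List.isPrefixOf ['%'] (c :: rest) = false := by
          simp [List.isPrefixOf]
          exact fun h' => hc h'.symm
        rw [if_neg (by simp [hp])]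
        simp only [List.length_cons] at h
        rw [ih _ _ _ (by omega)]
        rcases hsp : pvSpl rest with _ | ⟨p, ps⟩
        · exact absurd hsp (pvSpl_ne_nil rest)
        · simp [pvSpl, hc, hsp, pvConsHead]

theorem pv_splitOn_eq (l : List Char) : PySem.Chars.splitOn l ['%'] = pvSpl l := by
  rw [PySem.Chars.splitOn, pv_go_eq (l.length + 1) l [] [] (by omega)]
  simpa using pvConsHead_nil _ (pvSpl_ne_nil l)

theorem pv_endswith_concat (res : List Char) (c : Char) :
    PySem.Chars.endswith (res ++ [c]) ['\\'] = decide (c = '\\') := by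
  by_cases h : c = '\\'
  · subst h
    simp only [decide_true]
    exact (PySem.Chars.endswith_iff _ _).2 (List.suffix_append res ['\\'])
  · simp only [h, decide_false]
    rw [← Bool.not_eq_true, PySem.Chars.endswith_iff]
    intro hsuf
    rcases hsuf with ⟨t, ht⟩
    have := congrArg List.getLast? ht
    simp at this
    exact h this.symm

def pvB_entry (res : List Char) : List (List Char) → List Char
  | [] => res
  | p :: ps => pvB_loop (res ++ p) ps

theorem pvB_main (l : List Char) : ∀ (res : List Char),
    pvB_entry res (pvSpl l) = res ++ pvStrip l (PySem.Chars.endswith res ['\\']) := by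
  induction l with
  | nil => intro res; simp [pvSpl, pvB_entry, pvB_loop, pvStrip]
  | cons c r ih =>
    intro res
    rcases hsp : pvSpl r with _ | ⟨p, ps⟩
    · exact absurd hsp (pvSpl_ne_nil r)
    by_cases hc : c = '%'
    · subst hc
      have hsp2 : pvSpl ('%' :: r) = [] :: p :: ps := by rw [pvSpl, if_pos rfl, hsp]
      rw [hsp2]
      simp only [pvB_entry, List.append_nil, pvB_loop]
      by_cases he : PySem.Chars.endswith res ['\\'] = true
      · rw [if_pos he, he]
        have hih := ih (res ++ ['%'])
        rw [hsp] at hih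
        simp only [pvB_entry, List.append_assoc] at hih
        rw [show res ++ '%' :: p = res ++ (['%'] ++ p) from by simp, hih, pv_endswith_concat]
        simp [pvStrip]
      · rw [if_neg he]
        rw [Bool.not_eq_true] at he
        rw [he]
        simp [pvStrip]
    · have hsp2 : pvSpl (c :: r) = (c :: p) :: ps := by rw [pvSpl, if_neg hc, hsp]
      rw [hsp2]
      simp only [pvB_entry]
      have hih := ih (res ++ [c])
      rw [hsp] at hih
      simp only [pvB_entry, List.append_assoc] at hih
      rw [show res ++ c :: p = res ++ ([c] ++ p) from by simp, hih, pv_endswith_concat]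
      rw [pvStrip, if_neg (by simp [hc])]
      simp

theorem pvB_line_eq (l : List Char) : pvB_line l = pvStrip l false := by
  have h1 : pvB_line l = pvB_entry [] (pvSpl l) := by
    rw [pvB_line, pv_splitOn_eq]
    rcases hsp : pvSpl l with _ | ⟨p, ps⟩
    · exact absurd hsp (pvSpl_ne_nil l)
    · simp [pvB_entry]
  rw [h1]
  have := pvB_main l []
  have he : PySem.Chars.endswith ([] : List Char) ['\\'] = false := by decide
  rw [he] at this
  simpa using this

-- ===== VERDICT (by name: the statement is the Claim_ definition above) =====
theorem strip_bib_comments_py_spec : Claim_equal_strip_bib_comments_py := by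
  intro text _
  unfold Spec_strip_bib_comments_py strip_bib_comments_py strip_bib_comments_py_alt
  congr 1
  apply List.map_congr_left
  intro line _
  congr 1
  rw [pvA_line_eq, pvB_line_eq]
  simp
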